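-- pv_equiv track=rewrite | github.com/ChristensenCode/FinishedProjects | Euler/Problem_43.py | pandigital_combiner
-- ===== SOURCE A (Python) =====
-- def pandigital_combiner(lower_list, upper_list):
--     combined_list = []
--     for i in upper_list:
--         for j in lower_list:
--             possible_combined = j[0] + i
--             possible_combined_length = len(possible_combined)
--             possible_combined_set = set(possible_combined)
--             if j[1:] == i[:2] and possible_combined_length == len(possible_combined_set):
--                 combined_list.append(possible_combined)
--     return combined_list
-- ===== SOURCE B (Python) =====
-- def pandigital_combiner(lower_list, upper_list):
--     by_suffix = {}
--     for j in lower_list: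
--         if j:
--             by_suffix.setdefault(j[1:], []).append(j[0])
--     combined_list = []
--     for i in upper_list:
--         for first in by_suffix.get(i[:2], []):
--             possible_combined = first + i
--             if len(possible_combined) == len(set(possible_combined)):
--                 combined_list.append(possible_combined)
--     return combined_list
-- ===== Notes on version B (the rewrite author's own statement) =====
-- stated objective: faster
-- what changed: Replaces A's nested loop (rescanning all of lower_list for every upper element) by a hash join: lower_list is indexed once by its suffix j[1:] into a dict of first characters, and each upper element looks up its prefix i[:2] there.
import Mathlib
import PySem

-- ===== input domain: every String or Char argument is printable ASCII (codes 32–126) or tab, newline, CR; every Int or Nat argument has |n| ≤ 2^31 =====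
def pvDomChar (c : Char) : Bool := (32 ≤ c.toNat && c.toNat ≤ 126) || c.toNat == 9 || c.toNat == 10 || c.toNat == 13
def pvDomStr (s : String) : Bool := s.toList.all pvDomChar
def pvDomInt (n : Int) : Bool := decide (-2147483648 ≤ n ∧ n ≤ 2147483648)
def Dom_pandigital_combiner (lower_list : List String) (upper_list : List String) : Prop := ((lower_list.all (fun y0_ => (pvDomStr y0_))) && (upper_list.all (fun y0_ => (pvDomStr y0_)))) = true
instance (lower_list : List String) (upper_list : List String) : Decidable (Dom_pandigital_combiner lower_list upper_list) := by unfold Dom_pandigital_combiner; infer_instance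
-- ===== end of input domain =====

-- B replaces A's rescan of lower_list for every upper element by a hash join: lower_list is
-- indexed once by its suffix j[1:], each upper element looks up its prefix i[:2] (objective: faster).

-- ===== PORT A =====
-- Literal port of A: for i in upper_list, for j in lower_list; j[0] via pyGet? (none is exactly
-- Python's IndexError on j = "", excluded by Pre_; the port keeps the accumulator there).
def pandigital_combiner (lower_list : List String) (upper_list : List String) : List String :=
  upper_list.foldl (fun acc i =>
    lower_list.foldl (fun acc j =>
      match PySem.List.pyGet? j.toList 0 with
      | none => acc
      | some c =>
        let possible_combined : List Char := c :: i.toList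
        let possible_combined_length := possible_combined.length
        let possible_combined_set : PySem.Set Char := PySem.Set.ofList possible_combined
        if PySem.List.slice j.toList (some 1) none = PySem.List.slice i.toList none (some 2) ∧
            possible_combined_length = possible_combined_set.length
        then acc ++ [String.ofList possible_combined] else acc) acc) []

-- ===== PORT B =====
-- Literal port of B: build by_suffix : suffix j[1:] ↦ list of first chars j[0], skipping empty j
-- ('if j:'; setdefault(…,[]).append(…) = Dict.modify with default []), then scan by_suffix.get(i[:2], []).
def pandigital_combiner_alt (lower_list : List String) (upper_list : List String) : List String :=
  let by_suffix : PySem.Dict (List Char) (List Char) :=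
    lower_list.foldl (fun d j =>
      match j.toList with
      | [] => d
      | c :: _ => d.modify (PySem.List.slice j.toList (some 1) none) [] (· ++ [c])) PySem.Dict.empty
  upper_list.foldl (fun acc i =>
    (by_suffix.getD (PySem.List.slice i.toList none (some 2)) []).foldl (fun acc c =>
      let possible_combined : List Char := c :: i.toList
      if possible_combined.length = (PySem.Set.ofList possible_combined).length
      then acc ++ [String.ofList possible_combined] else acc) acc) []

-- ===== PRECONDITION & SPEC =====
-- Pre_ excludes exactly the inputs on which Python A raises: "" ∈ lower_list with a nonempty
-- upper_list (IndexError on j[0]); when upper_list is empty A never reaches j[0] and returns [].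
def Pre_pandigital_combiner (lower_list : List String) (upper_list : List String) : Prop :=
  "" ∉ lower_list ∨ upper_list = []
instance (lower_list : List String) (upper_list : List String) : Decidable (Pre_pandigital_combiner lower_list upper_list) := by unfold Pre_pandigital_combiner; infer_instance

def pvWitness_pandigital_combiner : List String × List String := (["123", "124"], ["34", "35"])

def Spec_pandigital_combiner (lower_list : List String) (upper_list : List String) (out : List String) : Prop := out = pandigital_combiner_alt lower_list upper_list
instance (lower_list : List String) (upper_list : List String) (out : List String) : Decidable (Spec_pandigital_combiner lower_list upper_list out) := by unfold Spec_pandigital_combiner; infer_instance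

-- ===== CLAIM (what is proved, stated in full; the proofs are below) =====
def Claim_equal_pandigital_combiner : Prop := ∀ (lower_list : List String) (upper_list : List String), Dom_pandigital_combiner lower_list upper_list → Pre_pandigital_combiner lower_list upper_list → Spec_pandigital_combiner lower_list upper_list (pandigital_combiner lower_list upper_list)

-- ===== LEMMAS AND PROOFS =====

-- j[1:] and j[0] as total functions of j (used only to state the proofs' invariants)
def pvKey (j : String) : List Char := PySem.List.slice j.toList (some 1) none
def pvFirst (j : String) : Char := (PySem.List.pyGet? j.toList 0).getD default

theorem pvGet0 (j : String) (h : j ≠ "") : PySem.List.pyGet? j.toList 0 = some (pvFirst j) := by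
  have hne : j.toList ≠ [] := by simpa [String.toList_eq_nil_iff] using h
  cases hj : j.toList with
  | nil => exact absurd hj hne
  | cons c t => simp [PySem.List.pyGet?, PySem.List.pyIdx?, pvFirst, hj]

theorem pvFirst_head (j : String) (c : Char) (t : List Char) (hj : j.toList = c :: t) :
    pvFirst j = c := by
  simp [pvFirst, PySem.List.pyGet?, PySem.List.pyIdx?, hj]

-- B's index characterised: looking up k returns the first chars of the lower strings whose tail is k
theorem pvDict (lower : List String) (h : "" ∉ lower) (k : List Char) :
    (lower.foldl (fun d j =>
      match j.toList with
      | [] => d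
      | c :: _ => d.modify (PySem.List.slice j.toList (some 1) none) [] (· ++ [c])) PySem.Dict.empty).getD k []
    = (lower.filter (fun j => pvKey j == k)).map pvFirst := by
  have h1 : lower.foldl (fun d j =>
      match j.toList with
      | [] => d
      | c :: _ => d.modify (PySem.List.slice j.toList (some 1) none) [] (· ++ [c])) PySem.Dict.empty
      = (lower.map (fun j => (pvKey j, pvFirst j))).foldl
          (fun d p => d.modify p.1 [] (· ++ [p.2])) PySem.Dict.empty := by
    rw [List.foldl_map]
    apply PySem.List.foldl_congr_mem
    intro d j hj
    have hne : j.toList ≠ [] := by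
      simpa [String.toList_eq_nil_iff] using (fun he => h (he ▸ hj) : j ≠ "")
    cases hc : j.toList with
    | nil => exact absurd hc hne
    | cons c t => simp [hc, pvKey, pvFirst_head j c t hc]
  rw [h1, PySem.Dict.getD_foldl_modify_append]
  simp [List.filter_map, Function.comp_def]

-- A's inner scan over lower_list equals B's scan over the index entry for i[:2]
theorem pvInner (lower : List String) (h : "" ∉ lower) (i : String) (acc : List String) :
    lower.foldl (fun acc j =>
      match PySem.List.pyGet? j.toList 0 with
      | none => acc
      | some c =>
        if PySem.List.slice j.toList (some 1) none = PySem.List.slice i.toList none (some 2) ∧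
            (c :: i.toList).length = (PySem.Set.ofList (c :: i.toList)).length
        then acc ++ [String.ofList (c :: i.toList)] else acc) acc
    = ((lower.filter (fun j => pvKey j == PySem.List.slice i.toList none (some 2))).map pvFirst).foldl
        (fun acc c =>
          if (c :: i.toList).length = (PySem.Set.ofList (c :: i.toList)).length
          then acc ++ [String.ofList (c :: i.toList)] else acc) acc := by
  have h1 : lower.foldl (fun acc j =>
      match PySem.List.pyGet? j.toList 0 with
      | none => acc
      | some c =>
        if PySem.List.slice j.toList (some 1) none = PySem.List.slice i.toList none (some 2) ∧
            (c :: i.toList).length = (PySem.Set.ofList (c :: i.toList)).length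
        then acc ++ [String.ofList (c :: i.toList)] else acc) acc
    = lower.foldl (fun acc j =>
        if pvKey j = PySem.List.slice i.toList none (some 2) ∧
            (pvFirst j :: i.toList).length = (PySem.Set.ofList (pvFirst j :: i.toList)).length
        then acc ++ [String.ofList (pvFirst j :: i.toList)] else acc) acc := by
    apply PySem.List.foldl_congr_mem
    intro a j hj
    rw [pvGet0 j (fun he => h (he ▸ hj))]; rfl
  rw [h1,
    PySem.List.foldl_append_ite
      (p := fun j => pvKey j = PySem.List.slice i.toList none (some 2) ∧
        (pvFirst j :: i.toList).length = (PySem.Set.ofList (pvFirst j :: i.toList)).length)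
      (f := fun j => String.ofList (pvFirst j :: i.toList)),
    PySem.List.foldl_append_ite
      (p := fun c => (c :: i.toList).length = (PySem.Set.ofList (c :: i.toList)).length)
      (f := fun c => String.ofList (c :: i.toList))]
  congr 1
  simp only [List.filter_map, List.filter_filter, List.map_map, Function.comp_def]
  rw [List.filter_congr (q := fun j =>
      (pvKey j == PySem.List.slice i.toList none (some 2)) &&
        decide ((pvFirst j :: i.toList).length = (PySem.Set.ofList (pvFirst j :: i.toList)).length))
    (fun j _ => by simp [Bool.beq_eq_decide_eq])]
  congr 1
  exact List.filter_congr (fun j _ => Bool.and_comm _ _)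

-- ===== VERDICT (by name: the statement is the Claim_ definition above) =====
theorem pandigital_combiner_spec : Claim_equal_pandigital_combiner := by
  intro lower upper _ hpre
  unfold Spec_pandigital_combiner pandigital_combiner pandigital_combiner_alt
  rcases hpre with hpre | hup
  · apply PySem.List.foldl_congr_mem
    intro acc i _
    rw [pvDict lower hpre, pvInner lower hpre i acc]
  · subst hup; rfl
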